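-- pv_equiv track=rewrite | github.com/svinther/AoC | 2023/a13.py | sigs
-- ===== SOURCE A (Python) =====
-- def sigs(grid):
--     RS = []
--     CS = []
--     for row in grid:
--         rs = 0
--         for i, c in enumerate(row):
--             if c == "#":
--                 rs += 2**i
--         RS.append(rs)
--
--     for col in zip(*grid):
--         cs = 0
--         for i, c in enumerate(col):
--             if c == "#":
--                 cs += 2**i
--         CS.append(cs)
--
--     return RS, CS
-- ===== SOURCE B (Python) =====
-- def sigs(grid):
--     # Single scan of the grid builds the row signatures by Horner accumulation;
--     # column signatures are then derived purely from those integers by bit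
--     # extraction ((v >> c) & 1) -- no transpose / second scan of the grid.
--     RS = []
--     for row in grid:
--         v = 0
--         for ch in reversed(row):
--             v = v * 2 + (ch == "#")
--         RS.append(v)
--     ncols = min(map(len, grid), default=0)
--     CS = []
--     for c in range(ncols):
--         s = 0
--         for v in reversed(RS):
--             s = s * 2 + ((v >> c) & 1)
--         CS.append(s)
--     return RS, CS
-- ===== Notes on version B (the rewrite author's own statement) =====
-- stated objective: alternative
-- what changed: B scans the grid only once, building row signatures by Horner accumulation, and then derives every column signature arithmetically from those integers by bit extraction ((RS[r] >> c) & 1), eliminating A's transpose (zip(*grid)) and second character scan of the grid.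
import Mathlib
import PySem

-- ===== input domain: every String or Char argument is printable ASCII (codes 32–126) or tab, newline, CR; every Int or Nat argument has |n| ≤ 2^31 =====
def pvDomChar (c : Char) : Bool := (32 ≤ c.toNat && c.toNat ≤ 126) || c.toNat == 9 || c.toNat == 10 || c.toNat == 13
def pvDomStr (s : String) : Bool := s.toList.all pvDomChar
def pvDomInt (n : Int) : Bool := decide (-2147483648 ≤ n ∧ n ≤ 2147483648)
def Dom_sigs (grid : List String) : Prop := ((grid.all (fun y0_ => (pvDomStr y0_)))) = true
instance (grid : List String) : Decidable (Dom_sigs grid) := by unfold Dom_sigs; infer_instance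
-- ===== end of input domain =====

-- B scans the grid once (Horner row signatures) and derives the column signatures from the
-- row-signature integers by bit extraction, instead of A's transpose-and-rescan (alternative, same cost).

-- ===== PORT A =====
-- signature of one line: for i, c in enumerate(line): if c == '#': rs += 2**i
def sigA (l : List Char) : Int :=
  (List.zipIdx l).foldl (fun a p => if p.1 = '#' then a + 2 ^ p.2 else a) 0

-- zip(*rows): emit heads while every row is nonempty (exact for Python's zip truncation)
def pyZip (rows : List (List Char)) : List (List Char) :=
  if rows.isEmpty || rows.any (fun r => r.isEmpty) then []
  else
    rows.map (fun r => r.headD ' ') :: pyZip (rows.map (fun r => r.tail))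
termination_by (rows.map List.length).sum
decreasing_by
  rename_i h
  rcases rows with _ | ⟨r, rs⟩
  · simp at h
  · have hr : r ≠ [] := by
      intro e; subst e; simp at h
    simp only [List.map_cons, List.sum_cons, List.map_map]
    simp [Function.comp]
    have h2' : (rs.map (fun x => x.length - 1)).sum ≤ (rs.map List.length).sum := by
      apply List.sum_le_sum
      intro x _
      omega
    have hrl : 1 ≤ r.length := by
      cases r with
      | nil => exact absurd rfl hr
      | cons a t => simp
    omega

def sigs (grid : List String) : List Int × List Int :=
  let rows := grid.map String.toList
  (rows.map sigA, (pyZip rows).map sigA)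

-- ===== PORT B =====
-- v = 0; for ch in reversed(row): v = v*2 + (ch == '#')
def hornerB (l : List Char) : Int :=
  l.reverse.foldl (fun v ch => v * 2 + (if ch = '#' then 1 else 0)) 0

def sigs_alt (grid : List String) : List Int × List Int :=
  let RS := (grid.map String.toList).map hornerB
  let ncols := ((grid.map (fun s => s.toList.length)).min?).getD 0   -- min(map(len, grid), default=0)
  (RS,
   (List.range ncols).map (fun (c : Nat) =>
     -- s = 0; for v in reversed(RS): s = s*2 + ((v >> c) & 1)   (>> and & ported exactly:
     -- Lean's >>> on Int is Python's arithmetic shift, PySem.Int.band is Python's &)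
     RS.reverse.foldl (fun (s v : Int) => s * 2 + PySem.Int.band (v >>> c) 1) 0))

-- ===== PRECONDITION & SPEC =====
def Spec_sigs (grid : List String) (out : List Int × List Int) : Prop := out = sigs_alt grid
instance (grid : List String) (out : List Int × List Int) : Decidable (Spec_sigs grid out) := by unfold Spec_sigs; infer_instance

-- ===== CLAIM (what is proved, stated in full; the proofs are below) =====
def Claim_equal_sigs : Prop := ∀ (grid : List String), Dom_sigs grid → Spec_sigs grid (sigs grid)

-- ===== LEMMAS AND PROOFS =====

def colFn (rows : List (List Char)) (c : Nat) : List Char := rows.map (fun r => r.getD c ' ')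

def hornerN (l : List Char) : Nat :=
  l.foldr (fun ch v => 2 * v + (if ch = '#' then 1 else 0)) 0

theorem hornerB_eq_natCast (l : List Char) : hornerB l = ((hornerN l : Nat) : Int) := by
  unfold hornerB hornerN
  rw [List.foldl_reverse]
  induction l with
  | nil => simp
  | cons x t ih =>
    simp only [List.foldr_cons, ih]
    split_ifs <;> push_cast <;> ring

theorem hornerN_bit (l : List Char) (c : Nat) (hc : c < l.length) :
    hornerN l / 2 ^ c % 2 = (if l.getD c ' ' = '#' then 1 else 0) := by
  induction l generalizing c with
  | nil => simp at hc
  | cons x t ih =>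
    cases c with
    | zero =>
      simp only [hornerN, List.foldr_cons, pow_zero, Nat.div_one, List.getD_cons_zero]
      split_ifs <;> omega
    | succ c =>
      have h2 : hornerN (x :: t) / 2 ^ (c + 1) = hornerN t / 2 ^ c := by
        unfold hornerN
        simp only [List.foldr_cons]
        rw [pow_succ', ← Nat.div_div_eq_div_mul]
        congr 1
        split_ifs <;> omega
      rw [h2, List.getD_cons_succ]
      exact ih c (by simpa using hc)

theorem bit_of_horner (l : List Char) (c : Nat) (hc : c < l.length) :
    PySem.Int.band (hornerB l >>> c) 1 = (if l.getD c ' ' = '#' then 1 else 0) := by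
  rw [hornerB_eq_natCast]
  have hshift : ((hornerN l : Nat) : Int) >>> c = ((hornerN l >>> c : Nat) : Int) := by
    simp [Int.shiftRight_eq]
  rw [hshift]
  have : PySem.Int.band ((hornerN l >>> c : Nat) : Int) 1
      = (((hornerN l >>> c) &&& 1 : Nat) : Int) := by
    exact_mod_cast PySem.Int.band_natCast _ 1
  rw [this, Nat.shiftRight_eq_div_pow, Nat.and_one_is_mod, hornerN_bit l c hc]
  split_ifs <;> simp

theorem sigA_aux (l : List Char) (k : Nat) (a : Int) :
    (List.zipIdx l k).foldl (fun a p => if p.1 = '#' then a + 2 ^ p.2 else a) a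
      = a + 2 ^ k * (l.foldr (fun ch v => 2 * v + (if ch = '#' then 1 else 0)) 0) := by
  induction l generalizing k a with
  | nil => simp
  | cons x t ih =>
    simp only [List.zipIdx_cons, List.foldl_cons, List.foldr_cons]
    rw [ih]
    split_ifs <;> ring

theorem sigA_eq_hornerB (l : List Char) : sigA l = hornerB l := by
  unfold sigA hornerB
  rw [List.foldl_reverse, sigA_aux]
  have : ∀ (ch : Char) (v : Int),
      (fun v ch => v * 2 + (if ch = '#' then 1 else 0)) v ch
        = 2 * v + (if ch = '#' then 1 else 0) := by intro ch v; ring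
  simp only [this]
  ring

theorem min_getD_eq_zero_of_mem (l : List Nat) (h0 : (0 : Nat) ∈ l) :
    l.min?.getD 0 = 0 := by
  cases h : l.min? with
  | none => rfl
  | some m =>
    have := (List.min?_eq_some_iff.mp h).2 0 h0
    simp [Nat.le_zero.mp this]

theorem minlen_tail (rows : List (List Char)) (hne : rows ≠ []) (hr : ∀ r ∈ rows, r ≠ []) :
    (((rows.map (fun r => r.tail)).map List.length).min?).getD 0 + 1
      = ((rows.map List.length).min?).getD 0 := by
  have hmap : ((rows.map (fun r => r.tail)).map List.length)
      = (rows.map List.length).map (fun x => x - 1) := by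
    simp [List.map_map, Function.comp_def, List.length_tail]
  rw [hmap]
  have hLne : rows.map List.length ≠ [] := by simpa using hne
  cases h : (rows.map List.length).min? with
  | none => exact absurd (List.min?_eq_none_iff.mp h) hLne
  | some m =>
    obtain ⟨hmem, hle⟩ := List.min?_eq_some_iff.mp h
    have hm1 : 1 ≤ m := by
      obtain ⟨y, hy, rfl⟩ := List.mem_map.mp hmem
      have := hr y hy
      cases y with
      | nil => exact absurd rfl this
      | cons _ _ => simp
    have h' : ((rows.map List.length).map (fun x => x - 1)).min? = some (m - 1) := by
      apply List.min?_eq_some_iff.mpr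
      constructor
      · exact List.mem_map.mpr ⟨m, by simpa using hmem, rfl⟩
      · intro b hb
        obtain ⟨y, hy, rfl⟩ := List.mem_map.mp hb
        have := hle y hy
        omega
    rw [h']
    simp
    omega

theorem pyZip_eq (rows : List (List Char)) :
    pyZip rows = (List.range (((rows.map List.length).min?).getD 0)).map (colFn rows) := by
  fun_induction pyZip rows with
  | case1 rows h =>
    rcases rows with _ | ⟨r, rs⟩
    · simp
    · simp only [Bool.or_eq_true, List.any_eq_true] at h
      rcases h with h | ⟨x, hx, hxe⟩
      · simp at h
      · have h0 : (0 : Nat) ∈ (r :: rs).map List.length := by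
          refine List.mem_map.mpr ⟨x, hx, ?_⟩
          simpa [List.isEmpty_iff] using hxe
        rw [min_getD_eq_zero_of_mem _ h0]
        simp
  | case2 rows h ih =>
    simp only [Bool.or_eq_true, not_or, List.any_eq_true, not_exists, not_and,
      Bool.not_eq_true] at h
    obtain ⟨h1, h2⟩ := h
    have hne : rows ≠ [] := by
      intro e; subst e; simp at h1
    have hr : ∀ r ∈ rows, r ≠ [] := by
      intro r hrm
      have := h2 r hrm
      simpa [List.isEmpty_iff] using this
    simp at ih
    rw [ih, ← minlen_tail rows hne hr, List.range_succ_eq_map, List.map_cons, List.map_map]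
    congr 1
    · unfold colFn
      apply List.map_congr_left
      intro r hrm
      cases r with
      | nil => exact absurd rfl (hr _ hrm)
      | cons a t => simp
    · simp only [List.map_map, Function.comp_def]
      apply List.map_congr_left
      intro c _
      unfold colFn
      simp only [List.map_map]
      apply List.map_congr_left
      intro r hrm
      cases r with
      | nil => exact absurd rfl (hr _ hrm)
      | cons a t => simp

theorem ncols_le_len (rows : List (List Char)) (r : List Char) (hrm : r ∈ rows) :
    ((rows.map List.length).min?).getD 0 ≤ r.length := by
  cases h : (rows.map List.length).min? with
  | none => simp
  | some m =>
    have := (List.min?_eq_some_iff.mp h).2 r.length (List.mem_map.mpr ⟨r, hrm, rfl⟩)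
    simpa using this

-- the column-c fold over the row signatures equals the signature of column c
theorem col_fold_eq (rows : List (List Char)) (c : Nat)
    (hc : ∀ r ∈ rows, c < r.length) :
    (rows.map hornerB).reverse.foldl (fun (s v : Int) => s * 2 + PySem.Int.band (v >>> c) 1) 0
      = hornerB (colFn rows c) := by
  calc (rows.map hornerB).reverse.foldl (fun (s v : Int) => s * 2 + PySem.Int.band (v >>> c) 1) 0
      = rows.reverse.foldl (fun s r => s * 2 + PySem.Int.band (hornerB r >>> c) 1) 0 := by
        rw [← List.map_reverse, List.foldl_map]
    _ = rows.reverse.foldl (fun s r => s * 2 + (if r.getD c ' ' = '#' then 1 else 0)) 0 := by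
        apply PySem.List.foldl_congr_mem
        intro s r hrm
        rw [bit_of_horner r c (hc r (by simpa using hrm))]
    _ = hornerB (colFn rows c) := by
        unfold hornerB colFn
        rw [← List.map_reverse, List.foldl_map]

theorem sigs_eq (grid : List String) : sigs grid = sigs_alt grid := by
  unfold sigs sigs_alt
  dsimp only
  congr 1
  · exact List.map_congr_left (fun l _ => sigA_eq_hornerB l)
  · have hmin : (grid.map (fun s => s.toList.length)).min?
        = ((grid.map String.toList).map List.length).min? := by
      rw [List.map_map]; rfl
    rw [pyZip_eq, hmin]
    simp only [List.map_map]
    apply List.map_congr_left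
    intro c hcm
    have hc := List.mem_range.mp hcm
    simp only [Function.comp_apply]
    rw [sigA_eq_hornerB, ← col_fold_eq _ _ (fun r hrm =>
      lt_of_lt_of_le (by simpa [List.map_map] using hc) (ncols_le_len (grid.map String.toList) r hrm))]
    simp [List.map_map]

-- ===== VERDICT (by name: the statement is the Claim_ definition above) =====
theorem sigs_spec : Claim_equal_sigs := by
  intro grid _
  unfold Spec_sigs
  exact sigs_eq grid
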